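-- pv_equiv track=rewrite | github.com/o-yutaka/black-origin | BLACK_ORIGIN/knowledge_graph/knowledge_index.py | index_knowledge
-- ===== SOURCE A (Python) =====
-- from collections import defaultdict
-- from typing import Dict, Iterable, List
--
-- def index_knowledge(entities: Iterable[str], relations: Iterable[tuple[str, str, str]]) -> Dict[str, List[str]]:
--     index: Dict[str, List[str]] = defaultdict(list)
--     relation_list = list(relations)
--     for entity in entities:
--         for left, relation, right in relation_list:
--             if entity in (left, right):
--                 index[entity].append(f"{left}:{relation}:{right}")
--     return dict(index)
-- ===== SOURCE B (Python) =====
-- from collections import defaultdict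
-- from typing import Dict, Iterable, List
--
-- def index_knowledge(entities: Iterable[str], relations: Iterable[tuple[str, str, str]]) -> Dict[str, List[str]]:
--     # One pass over relations: flatten to (endpoint, text) pairs, group them by
--     # endpoint, then a single lookup per entity -- O(E + R) instead of O(E * R).
--     pairs = []
--     for left, relation, right in relations:
--         text = f"{left}:{relation}:{right}"
--         pairs.append((left, text))
--         if right != left:
--             pairs.append((right, text))
--     by_endpoint: Dict[str, List[str]] = defaultdict(list)
--     for endpoint, text in pairs:
--         by_endpoint[endpoint].append(text)
--     index: Dict[str, List[str]] = {}
--     for entity in entities: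
--         if entity in by_endpoint:
--             index[entity] = index.get(entity, []) + by_endpoint[entity]
--     return index
-- ===== Notes on version B (the rewrite author's own statement) =====
-- stated objective: faster
-- what changed: Replaced the per-entity scan of the whole relation list by a single grouping pass that buckets relation strings by endpoint, after which each entity is a dictionary lookup.
import Mathlib
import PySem

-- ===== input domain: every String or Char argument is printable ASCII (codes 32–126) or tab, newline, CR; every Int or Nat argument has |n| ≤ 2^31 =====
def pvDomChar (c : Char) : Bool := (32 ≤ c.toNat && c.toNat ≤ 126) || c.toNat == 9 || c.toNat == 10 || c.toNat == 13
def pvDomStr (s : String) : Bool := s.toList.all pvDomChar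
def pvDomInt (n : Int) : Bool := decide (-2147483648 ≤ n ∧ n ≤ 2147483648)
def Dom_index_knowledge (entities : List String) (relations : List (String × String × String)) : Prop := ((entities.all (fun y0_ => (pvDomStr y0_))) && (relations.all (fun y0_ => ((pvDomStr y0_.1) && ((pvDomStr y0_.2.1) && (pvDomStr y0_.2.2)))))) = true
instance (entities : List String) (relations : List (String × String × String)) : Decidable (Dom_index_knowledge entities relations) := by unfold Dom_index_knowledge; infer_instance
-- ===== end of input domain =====

-- B replaces A's per-entity scan of all relations by one grouping pass over relations (bucket by endpoint) plus a lookup per entity; objective: faster (measured).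
-- ===== PORT A =====
def index_knowledge (entities : List String) (relations : List (String × String × String)) : List (String × List String) :=
  let relation_list := relations
  (entities.foldl (fun idx e =>
    relation_list.foldl (fun idx r =>
      if e == r.1 || e == r.2.2 then
        idx.modify e [] (· ++ [r.1 ++ ":" ++ r.2.1 ++ ":" ++ r.2.2])
      else idx) idx) (PySem.Dict.empty : PySem.Dict String (List String))).items

-- ===== PORT B =====
def index_knowledge_alt (entities : List String) (relations : List (String × String × String)) : List (String × List String) :=
  let pairs := relations.foldl (fun acc r =>
    acc ++ ([(r.1, r.1 ++ ":" ++ r.2.1 ++ ":" ++ r.2.2)] ++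
      (if r.2.2 ≠ r.1 then [(r.2.2, r.1 ++ ":" ++ r.2.1 ++ ":" ++ r.2.2)] else []))) []
  let by_endpoint := pairs.foldl (fun d p => d.modify p.1 [] (· ++ [p.2]))
    (PySem.Dict.empty : PySem.Dict String (List String))
  (entities.foldl (fun idx e =>
    if by_endpoint.contains e then
      idx.insert e (idx.getD e [] ++ by_endpoint.getD e [])
    else idx) (PySem.Dict.empty : PySem.Dict String (List String))).items

-- ===== PRECONDITION & SPEC =====
def Spec_index_knowledge (entities : List String) (relations : List (String × String × String)) (out : List (String × List String)) : Prop := out = index_knowledge_alt entities relations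
instance (entities : List String) (relations : List (String × String × String)) (out : List (String × List String)) : Decidable (Spec_index_knowledge entities relations out) := by unfold Spec_index_knowledge; infer_instance

-- ===== CLAIM (what is proved, stated in full; the proofs are below) =====
def Claim_equal_index_knowledge : Prop := ∀ (entities : List String) (relations : List (String × String × String)), Dom_index_knowledge entities relations → Spec_index_knowledge entities relations (index_knowledge entities relations)

-- ===== LEMMAS AND PROOFS =====

-- the strings mentioning e, in relation order
def pvMentions (e : String) (rels : List (String × String × String)) : List String :=
  (rels.filter (fun r => e == r.1 || e == r.2.2)).map (fun r => r.1 ++ ":" ++ r.2.1 ++ ":" ++ r.2.2)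

def pvG (r : String × String × String) : List (String × String) :=
  [(r.1, r.1 ++ ":" ++ r.2.1 ++ ":" ++ r.2.2)] ++
    (if r.2.2 ≠ r.1 then [(r.2.2, r.1 ++ ":" ++ r.2.1 ++ ":" ++ r.2.2)] else [])

lemma pv_modify_modify {κ ν : Type} [BEq κ] [LawfulBEq κ] (d : PySem.Dict κ ν) (k : κ) (d0 : ν)
    (f g : ν → ν) : (d.modify k d0 f).modify k d0 g = d.modify k d0 (fun v => g (f v)) := by
  simp [PySem.Dict.modify, PySem.Dict.getD_insert_self, PySem.Dict.insert_insert_self]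

-- A's inner loop, characterised
lemma pv_inner (e : String) (rels : List (String × String × String))
    (idx : PySem.Dict String (List String)) :
    rels.foldl (fun idx r =>
      if e == r.1 || e == r.2.2 then
        idx.modify e [] (· ++ [r.1 ++ ":" ++ r.2.1 ++ ":" ++ r.2.2])
      else idx) idx =
    if pvMentions e rels = [] then idx else idx.modify e [] (· ++ pvMentions e rels) := by
  induction rels generalizing idx with
  | nil => simp [pvMentions]
  | cons r rels ih =>
    by_cases h : (e == r.1 || e == r.2.2) = true
    · simp only [List.foldl_cons, ih, pvMentions, List.filter_cons, h]
      by_cases h2 : (rels.filter (fun r => e == r.1 || e == r.2.2)).map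
          (fun r => r.1 ++ ":" ++ r.2.1 ++ ":" ++ r.2.2) = []
      · simp [h2]
      · simp [h2, pv_modify_modify]
    · rw [List.foldl_cons, if_neg h, ih]
      simp only [pvMentions]
      rw [List.filter_cons_of_neg (by simpa using h)]

-- one relation's contribution to the pair list, filtered at e
lemma pv_pvG (e : String) (r : String × String × String) :
    ((pvG r).filter (fun p => p.1 == e)).map (fun p => p.2) =
      if e == r.1 || e == r.2.2 then [r.1 ++ ":" ++ r.2.1 ++ ":" ++ r.2.2] else [] := by
  by_cases h1 : r.1 = e
  · subst h1
    by_cases hne : r.2.2 = r.1 <;> simp [pvG, hne]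
  · have h1' : ¬ (e = r.1) := fun hh => h1 hh.symm
    by_cases h2 : r.2.2 = e
    · have hne : r.2.2 ≠ r.1 := fun hc => h1 (h2 ▸ hc).symm
      simp [pvG, h1, h1', h2]
    · have h2' : ¬ (e = r.2.2) := fun hh => h2 hh.symm
      by_cases hne : r.2.2 = r.1 <;> simp [pvG, hne, h1, h1', h2, h2']

-- the flattened pair list, filtered at e, is exactly pvMentions e
lemma pv_filter_flatMap (e : String) (rels : List (String × String × String)) :
    ((rels.flatMap pvG).filter (fun p => p.1 == e)).map (fun p => p.2) = pvMentions e rels := by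
  induction rels with
  | nil => simp [pvMentions]
  | cons r rels ih =>
    simp only [List.flatMap_cons, List.filter_append, List.map_append, ih, pvMentions,
      List.filter_cons, pv_pvG]
    by_cases h : (e == r.1 || e == r.2.2) = true <;> simp [h]

-- key membership in the endpoint dict decides whether e is mentioned at all
lemma pv_contains (e : String) (rels : List (String × String × String)) :
    (((rels.flatMap pvG).foldl (fun d p => d.modify p.1 [] (· ++ [p.2]))
      (PySem.Dict.empty : PySem.Dict String (List String))).contains e) =
    !(decide (pvMentions e rels = [])) := by
  rw [show (fun (d : PySem.Dict String (List String)) (p : String × String) =>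
        d.modify p.1 [] (· ++ [p.2])) =
      (fun d p => d.modify ((fun q : String × String => q.1) p) [] (· ++ [p.2])) from rfl,
    PySem.Dict.contains_eq_decide_mem_keys, PySem.Dict.keys_foldl_modify_key]
  have hiff : e ∈ (rels.flatMap pvG).map (fun p => p.1) ↔ pvMentions e rels ≠ [] := by
    rw [← pv_filter_flatMap e rels]
    constructor
    · intro hm hnil
      obtain ⟨p, hp, hpe⟩ := List.mem_map.mp hm
      rw [List.map_eq_nil_iff, List.filter_eq_nil_iff] at hnil
      exact hnil p hp (by simp [hpe])
    · intro hne
      have h2 : ((rels.flatMap pvG).filter (fun p => p.1 == e)) ≠ [] := by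
        intro hc; exact hne (by rw [hc]; rfl)
      obtain ⟨p, hp⟩ := List.exists_mem_of_ne_nil _ h2
      exact List.mem_map.mpr ⟨p, List.mem_of_mem_filter hp,
        by simpa using List.of_mem_filter hp⟩
  simp only [PySem.Dict.keys_empty, PySem.Set.update_nil_left, PySem.Set.mem_ofList]
  by_cases h : pvMentions e rels = [] <;> simp [h, hiff]

-- the grouped dict carries exactly pvMentions e at key e
lemma pv_getD (e : String) (rels : List (String × String × String)) :
    (((rels.flatMap pvG).foldl (fun d p => d.modify p.1 [] (· ++ [p.2]))
      (PySem.Dict.empty : PySem.Dict String (List String))).getD e []) = pvMentions e rels := by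
  rw [PySem.Dict.getD_foldl_modify_append, PySem.Dict.getD_empty, List.nil_append,
    pv_filter_flatMap]

-- ===== VERDICT (by name: the statement is the Claim_ definition above) =====
theorem index_knowledge_spec : Claim_equal_index_knowledge := by
  intro entities relations _
  unfold Spec_index_knowledge index_knowledge index_knowledge_alt
  rw [show relations.foldl (fun acc r =>
      acc ++ ([(r.1, r.1 ++ ":" ++ r.2.1 ++ ":" ++ r.2.2)] ++
        (if r.2.2 ≠ r.1 then [(r.2.2, r.1 ++ ":" ++ r.2.1 ++ ":" ++ r.2.2)] else []))) [] =
      [] ++ relations.flatMap pvG from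
    PySem.List.foldl_append_eq_flatMap pvG relations []]
  simp only [List.nil_append]
  congr 1
  have hstep : ∀ (idx : PySem.Dict String (List String)) (e : String),
      (relations.foldl (fun idx r =>
        if e == r.1 || e == r.2.2 then
          idx.modify e [] (· ++ [r.1 ++ ":" ++ r.2.1 ++ ":" ++ r.2.2])
        else idx) idx) =
      (if ((relations.flatMap pvG).foldl (fun d p => d.modify p.1 [] (· ++ [p.2]))
            (PySem.Dict.empty : PySem.Dict String (List String))).contains e then
        idx.insert e (idx.getD e [] ++
          ((relations.flatMap pvG).foldl (fun d p => d.modify p.1 [] (· ++ [p.2]))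
            (PySem.Dict.empty : PySem.Dict String (List String))).getD e [])
      else idx) := by
    intro idx e
    rw [pv_inner, pv_contains e relations, pv_getD e relations]
    by_cases h : pvMentions e relations = [] <;> simp [h, PySem.Dict.modify]
  rw [show (fun (idx : PySem.Dict String (List String)) (e : String) =>
      relations.foldl (fun idx r =>
        if e == r.1 || e == r.2.2 then
          idx.modify e [] (· ++ [r.1 ++ ":" ++ r.2.1 ++ ":" ++ r.2.2])
        else idx) idx) = (fun idx e =>
      if ((relations.flatMap pvG).foldl (fun d p => d.modify p.1 [] (· ++ [p.2]))
            (PySem.Dict.empty : PySem.Dict String (List String))).contains e then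
        idx.insert e (idx.getD e [] ++
          ((relations.flatMap pvG).foldl (fun d p => d.modify p.1 [] (· ++ [p.2]))
            (PySem.Dict.empty : PySem.Dict String (List String))).getD e [])
      else idx) from funext fun idx => funext fun e => hstep idx e]
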